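-- pv_equiv track=rewrite | github.com/Luiznfe/Novo-TCC | funcs.py | parent_seq
-- ===== SOURCE A (Python) =====
-- def parent_seq(p1, c_point):
--     # começa do segundo ponto de corte e vai até o primeiro
--     new_seq = []
--     i = c_point[1] + 1
--     while True:
--         if i == len(p1):
--             i = 0
--         if i == c_point[1]:
--             new_seq.append(p1[i])
--             break
--         new_seq.append(p1[i])
--         i += 1
--     return new_seq
-- ===== SOURCE B (Python) =====
-- def parent_seq(p1, c_point):
--     start = (c_point[1] + 1) % len(p1)
--     return p1[start:] + p1[:start]
-- ===== Notes on version B (the rewrite author's own statement) =====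
-- stated objective: simpler
-- what changed: Replaces the element-by-element wrap-around while loop with a closed-form rotation: start = (c_point[1]+1) % len(p1) and two slice copies p1[start:] + p1[:start].
import Mathlib
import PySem

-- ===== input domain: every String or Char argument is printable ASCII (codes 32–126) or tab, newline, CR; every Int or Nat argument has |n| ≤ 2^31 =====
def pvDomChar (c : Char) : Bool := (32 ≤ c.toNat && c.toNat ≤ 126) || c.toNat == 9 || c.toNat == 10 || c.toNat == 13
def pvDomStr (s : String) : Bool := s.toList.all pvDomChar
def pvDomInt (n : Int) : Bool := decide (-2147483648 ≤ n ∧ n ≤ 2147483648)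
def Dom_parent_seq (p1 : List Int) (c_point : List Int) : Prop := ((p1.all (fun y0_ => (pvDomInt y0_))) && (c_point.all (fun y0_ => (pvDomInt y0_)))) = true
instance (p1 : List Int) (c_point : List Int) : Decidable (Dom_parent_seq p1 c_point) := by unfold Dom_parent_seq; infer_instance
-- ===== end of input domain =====

-- B replaces A's element-by-element wrap-around while loop with a closed-form
-- rotation: start = (c_point[1]+1) % len(p1), then p1[start:] + p1[:start] (simpler).

-- ===== PORT A =====
-- the 'while True' loop; fuel is only for totality — under Pre_ the break fires
-- before fuel runs out (the loop appends exactly len(p1) elements)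
def parent_seqLoop (p1 : List Int) (cp1 : Int) : Nat → Int → List Int → List Int
  | 0, _, acc => acc
  | f + 1, i, acc =>
    let i := if i = (p1.length : Int) then 0 else i
    if i = cp1 then acc ++ [PySem.List.pyGetD p1 i 0]
    else parent_seqLoop p1 cp1 f (i + 1) (acc ++ [PySem.List.pyGetD p1 i 0])

def parent_seq (p1 : List Int) (c_point : List Int) : List Int :=
  let cp1 := PySem.List.pyGetD c_point 1 0
  parent_seqLoop p1 cp1 p1.length (cp1 + 1) []

-- ===== PORT B =====
def parent_seq_alt (p1 : List Int) (c_point : List Int) : List Int :=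
  let start := PySem.Int.mod (PySem.List.pyGetD c_point 1 0 + 1) (p1.length : Int)
  PySem.List.slice p1 (some start) none ++ PySem.List.slice p1 none (some start)

-- ===== PRECONDITION & SPEC =====
-- Pre_ = exactly the inputs where A returns: p1 nonempty (else IndexError or
-- ZeroDivision in B), c_point has an index 1, and the cut point is an in-range
-- nonnegative index (A raises IndexError above, diverges for negative cut points).
def Pre_parent_seq (p1 : List Int) (c_point : List Int) : Prop :=
  p1 ≠ [] ∧ 2 ≤ c_point.length ∧
    0 ≤ PySem.List.pyGetD c_point 1 0 ∧ PySem.List.pyGetD c_point 1 0 < (p1.length : Int)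
instance (p1 : List Int) (c_point : List Int) : Decidable (Pre_parent_seq p1 c_point) := by
  unfold Pre_parent_seq; infer_instance

def pvWitness_parent_seq : List Int × List Int := ([1, 2, 3, 4, 5], [0, 2])

def Spec_parent_seq (p1 : List Int) (c_point : List Int) (out : List Int) : Prop :=
  out = parent_seq_alt p1 c_point
instance (p1 : List Int) (c_point : List Int) (out : List Int) : Decidable (Spec_parent_seq p1 c_point out) := by
  unfold Spec_parent_seq; infer_instance

-- ===== CLAIM (what is proved, stated in full; the proofs are below) =====
def Claim_equal_parent_seq : Prop := ∀ (p1 : List Int) (c_point : List Int), Dom_parent_seq p1 c_point → Pre_parent_seq p1 c_point → Spec_parent_seq p1 c_point (parent_seq p1 c_point)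

-- ===== LEMMAS AND PROOFS =====

-- one unfolding step of the while loop when the index is not len(p1)
theorem loop_step (p1 : List Int) (cp1 : Int) (f : Nat) (i : Int) (acc : List Int)
    (h : ¬ i = (p1.length : Int)) :
    parent_seqLoop p1 cp1 (f + 1) i acc =
      if i = cp1 then acc ++ [PySem.List.pyGetD p1 i 0]
      else parent_seqLoop p1 cp1 f (i + 1) (acc ++ [PySem.List.pyGetD p1 i 0]) := by
  simp only [parent_seqLoop, if_neg h]

-- one unfolding step at the wrap point i = len(p1)
theorem loop_step_wrap (p1 : List Int) (cp1 : Int) (f : Nat) (acc : List Int) :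
    parent_seqLoop p1 cp1 (f + 1) (p1.length : Int) acc =
      if 0 = cp1 then acc ++ [PySem.List.pyGetD p1 0 0]
      else parent_seqLoop p1 cp1 f 1 (acc ++ [PySem.List.pyGetD p1 0 0]) := by
  simp [parent_seqLoop]

theorem take_one_eq (l : List Int) (h : 0 < l.length) : l.take 1 = [l[0]] := by
  cases l with
  | nil => simp at h
  | cons a t => simp

theorem take_succ_eq (l : List Int) (h : 0 < l.length) (k : Nat) :
    l.take (k + 1) = l[0] :: (l.drop 1).take k := by
  cases l with
  | nil => simp at h
  | cons a t => simp

theorem pyGetD_at (p1 : List Int) (i : Nat) (h : i < p1.length) :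
    PySem.List.pyGetD p1 (i : Int) 0 = p1[i] := by
  rw [PySem.List.pyGetD_natCast, List.getD_eq_getElem]

-- no-wrap phase: from index i ≤ k straight up to the stop index k (inclusive)
theorem loop_upto (p1 : List Int) (k : Nat) (hk : k < p1.length) :
    ∀ (f i : Nat) (acc : List Int), i ≤ k → k - i < f →
      parent_seqLoop p1 (k : Int) f (i : Int) acc = acc ++ (p1.drop i).take (k + 1 - i) := by
  intro f
  induction f with
  | zero => intro i acc _ h; omega
  | succ f ih =>
    intro i acc hik hf
    have hin : i < p1.length := by omega
    have hget := pyGetD_at p1 i hin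
    have hdrop : p1.drop i = p1[i] :: p1.drop (i + 1) := List.drop_eq_getElem_cons hin
    rw [loop_step p1 _ f _ acc (by omega)]
    by_cases hik' : i = k
    · subst hik'
      rw [if_pos rfl, hget, show i + 1 - i = 1 by omega, hdrop]
      simp only [List.take_succ_cons, List.take_zero]
    · rw [if_neg (by omega : ¬ ((i : Int) = (k : Int)))]
      rw [show ((i : Int) + 1) = ((i + 1 : Nat) : Int) by push_cast; ring]
      rw [ih (i + 1) _ (by omega) (by omega), hget]
      rw [show k + 1 - i = (k + 1 - (i + 1)) + 1 by omega, hdrop, List.take_succ_cons]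
      simp

-- tail phase: from index i past the stop point k to the end, wrap, then up to k
theorem loop_wrap (p1 : List Int) (k : Nat) (hk : k < p1.length) :
    ∀ (f i : Nat) (acc : List Int), k < i → i ≤ p1.length → p1.length - i + k < f →
      parent_seqLoop p1 (k : Int) f (i : Int) acc = acc ++ p1.drop i ++ p1.take (k + 1) := by
  intro f
  induction f with
  | zero => intro i acc _ _ h; omega
  | succ f ih =>
    intro i acc hki hin hf
    have hn0 : 0 < p1.length := by omega
    by_cases hend : i = p1.length
    · subst hend
      have hget0 : PySem.List.pyGetD p1 (0 : Int) 0 = p1[0] := by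
        rw [show (0 : Int) = ((0 : Nat) : Int) by simp]
        exact pyGetD_at p1 0 hn0
      rw [loop_step_wrap]
      by_cases hk0 : k = 0
      · subst hk0
        rw [if_pos (by simp), hget0]
        simp [take_one_eq p1 hn0]
      · rw [if_neg (by omega : ¬ ((0 : Int) = (k : Int)))]
        rw [show (1 : Int) = ((1 : Nat) : Int) by simp]
        rw [loop_upto p1 k hk f 1 _ (by omega) (by omega), hget0]
        rw [show k + 1 - 1 = k by omega, List.drop_length, take_succ_eq p1 hn0 k]
        simp
    · have hin' : i < p1.length := by omega
      have hget := pyGetD_at p1 i hin'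
      have hdrop : p1.drop i = p1[i] :: p1.drop (i + 1) := List.drop_eq_getElem_cons hin'
      rw [loop_step p1 _ f _ acc (by omega)]
      rw [if_neg (by omega : ¬ ((i : Int) = (k : Int)))]
      rw [show ((i : Int) + 1) = ((i + 1 : Nat) : Int) by push_cast; ring]
      rw [ih (i + 1) _ (by omega) (by omega) (by omega), hget, hdrop]
      simp only [List.append_assoc, List.cons_append, List.nil_append]

-- ===== VERDICT =====
theorem parent_seq_spec : Claim_equal_parent_seq := by
  intro p1 c_point _ hpre
  obtain ⟨hne, hlen, hc0, hclt⟩ := hpre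
  have hn0 : 0 < p1.length := by cases p1 <;> simp_all
  unfold Spec_parent_seq
  simp only [parent_seq, parent_seq_alt]
  set c : Int := PySem.List.pyGetD c_point 1 0 with hc
  set k : Nat := c.toNat with hkdef
  have hkn : k < p1.length := by omega
  rw [show c = (k : Int) by omega]
  by_cases hlast : k + 1 = p1.length
  · have hmod : PySem.Int.mod ((k : Int) + 1) (p1.length : Int) = 0 := by
      rw [PySem.Int.mod_eq_emod_of_pos (by omega), show ((k : Int) + 1) = (p1.length : Int) by omega]
      simp
    rw [hmod, show ((k : Int) + 1) = ((p1.length : Nat) : Int) by omega]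
    rw [loop_wrap p1 k hkn p1.length p1.length [] (by omega) (le_refl _) (by omega)]
    rw [show (0 : Int) = ((0 : Nat) : Int) by simp]
    rw [PySem.List.slice_from_natCast, PySem.List.slice_to_natCast]
    simp [show k + 1 = p1.length from hlast]
  · have hmod : PySem.Int.mod ((k : Int) + 1) (p1.length : Int) = ((k + 1 : Nat) : Int) := by
      rw [PySem.Int.mod_eq_emod_of_pos (by omega)]
      rw [Int.emod_eq_of_lt (by omega) (by push_cast; omega)]
      push_cast; ring
    rw [hmod, show ((k : Int) + 1) = ((k + 1 : Nat) : Int) by omega]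
    rw [loop_wrap p1 k hkn p1.length (k + 1) [] (by omega) (by omega) (by omega)]
    rw [PySem.List.slice_from_natCast, PySem.List.slice_to_natCast]
    simp
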